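-- pv_equiv track=rewrite | github.com/mathieukapfer/lib | parser.py/test/stdlib.py | line_from_index
-- ===== SOURCE A (Python) =====
-- def line_from_index(text, index):
--     lines = text.splitlines(True)
--     line_start_index = 0
--     for line in lines:
--         if line_start_index + len(line) > index:
--             return (line[:-1], line_start_index)
--         line_start_index += len(line)
--     return ("", len(text))
-- ===== SOURCE B (Python) =====
-- def _bisect_right(a, x):
--     lo, hi = 0, len(a)
--     while lo < hi:
--         mid = (lo + hi) // 2
--         if x < a[mid]:
--             hi = mid
--         else:
--             lo = mid + 1
--     return lo
--
--
-- def line_from_index(text, index):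
--     lines = text.splitlines(True)
--     ends = []
--     total = 0
--     for line in lines:
--         total += len(line)
--         ends.append(total)
--     i = _bisect_right(ends, index)
--     if i < len(lines):
--         return (lines[i][:-1], ends[i] - len(lines[i]))
--     return ("", len(text))
-- ===== Notes on version B (the rewrite author's own statement) =====
-- stated objective: alternative
-- what changed: Replaces A's single linear scan with accumulator by building the list of cumulative line-end offsets once and binary-searching it (hand-written bisect_right) for the first line whose end exceeds index.
import Mathlib
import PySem

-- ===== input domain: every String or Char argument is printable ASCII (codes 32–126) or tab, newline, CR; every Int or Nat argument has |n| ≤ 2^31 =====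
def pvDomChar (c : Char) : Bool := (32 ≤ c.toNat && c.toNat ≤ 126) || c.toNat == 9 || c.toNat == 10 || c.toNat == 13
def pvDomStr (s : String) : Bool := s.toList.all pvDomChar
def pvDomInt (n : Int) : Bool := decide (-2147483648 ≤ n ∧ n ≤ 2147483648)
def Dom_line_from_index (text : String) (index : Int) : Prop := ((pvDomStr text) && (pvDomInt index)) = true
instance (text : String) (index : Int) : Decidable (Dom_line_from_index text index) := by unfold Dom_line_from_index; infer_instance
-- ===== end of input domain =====

-- B replaces A's linear scan with a cumulative end-offset table plus binary search (same result, different traversal).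

-- text.splitlines(True) ported by hand: exact on the Dom character set, where the only
-- line separators Python recognises are '\n', '\r' and '\r\n'.
def splitlinesKeep (cs : List Char) : List (List Char) :=
  go [] cs
where
  go (acc : List Char) : List Char → List (List Char)
    | [] => if acc = [] then [] else [acc.reverse]
    | '\r' :: '\n' :: rest => (acc.reverse ++ ['\r', '\n']) :: go [] rest
    | '\r' :: rest => (acc.reverse ++ ['\r']) :: go [] rest
    | '\n' :: rest => (acc.reverse ++ ['\n']) :: go [] rest
    | c :: rest => go (c :: acc) rest

-- ===== PORT A =====
-- A's for-loop over the kept-ends lines, carrying line_start_index.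
def lfiLoop (n : Int) (index : Int) (s : Int) : List (List Char) → String × Int
  | [] => ("", n)
  | l :: rest =>
    if s + (l.length : Int) > index then
      (String.ofList (PySem.List.slice l none (some (-1))), s)   -- line[:-1]
    else lfiLoop n index (s + (l.length : Int)) rest

def line_from_index (text : String) (index : Int) : String × Int :=
  lfiLoop (PySem.Str.len text) index 0 (splitlinesKeep text.toList)

-- ===== PORT B =====
-- B's first loop: cumulative end offsets of the lines (ends[i] = total length of lines[0..i]).
def cumEnds (s : Int) : List (List Char) → List Int
  | [] => []
  | l :: rest => (s + (l.length : Int)) :: cumEnds (s + (l.length : Int)) rest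

-- _bisect_right in Source B is the standard lo/hi binary-search loop; PySem.List.bisectRight is that same loop.
def line_from_index_alt (text : String) (index : Int) : String × Int :=
  let lines := splitlinesKeep text.toList
  let ends := cumEnds 0 lines
  let i := PySem.List.bisectRight ends index
  if i < lines.length then
    (String.ofList (PySem.List.slice (lines.getD i []) none (some (-1))),
      ends.getD i 0 - ((lines.getD i []).length : Int))   -- i < length, so getD is plain indexing
  else ("", (PySem.Str.len text))

-- ===== PRECONDITION & SPEC =====
def Spec_line_from_index (text : String) (index : Int) (out : String × Int) : Prop := out = line_from_index_alt text index
instance (text : String) (index : Int) (out : String × Int) : Decidable (Spec_line_from_index text index out) := by unfold Spec_line_from_index; infer_instance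

-- ===== CLAIM (what is proved, stated in full; the proofs are below) =====
def Claim_equal_line_from_index : Prop := ∀ (text : String) (index : Int), Dom_line_from_index text index → Spec_line_from_index text index (line_from_index text index)

-- ===== LEMMAS AND PROOFS =====

theorem cumEnds_lb (s : Int) (ls : List (List Char)) : ∀ x ∈ cumEnds s ls, s ≤ x := by
  induction ls generalizing s with
  | nil => simp [cumEnds]
  | cons l rest ih =>
    intro x hx
    simp [cumEnds] at hx
    rcases hx with h | h
    · omega
    · have := ih (s + l.length) x h; omega

theorem cumEnds_pairwise (s : Int) (ls : List (List Char)) :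
    List.Pairwise (fun a b => a ≤ b) (cumEnds s ls) := by
  induction ls generalizing s with
  | nil => simp [cumEnds]
  | cons l rest ih =>
    simp only [cumEnds, List.pairwise_cons]
    exact ⟨fun x hx => by have := cumEnds_lb (s + l.length) rest x hx; omega, ih _⟩

theorem bisectRight_unique (xs : List Int) (x : Int) (k : Nat)
    (hs : List.Pairwise (fun a b => a ≤ b) xs)
    (hk : k ≤ xs.length)
    (h2 : ∀ j (hj : j < xs.length), j < k → xs[j] ≤ x)
    (h3 : ∀ j (hj : j < xs.length), k ≤ j → x < xs[j]) :
    PySem.List.bisectRight xs x = k := by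
  obtain ⟨hi1, hi2, hi3⟩ := PySem.List.bisectRight_spec xs x hs
  set i := PySem.List.bisectRight xs x with hidef
  by_contra hne
  rcases Nat.lt_or_ge i k with h | h
  · have hlt : i < xs.length := lt_of_lt_of_le h hk
    have := h2 i hlt h
    have := hi3 i hlt (le_refl i)
    omega
  · have hkx : k < i ∨ k = i := by omega
    rcases hkx with hkx | hkx
    · have hlt : k < xs.length := lt_of_lt_of_le hkx hi1
      have := hi2 k hlt hkx
      have := h3 k hlt (le_refl k)
      omega
    · exact hne hkx.symm

theorem bisectRight_cons_lt (e : Int) (es : List Int) (x : Int)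
    (hs : List.Pairwise (fun a b => a ≤ b) (e :: es)) (h : x < e) :
    PySem.List.bisectRight (e :: es) x = 0 := by
  apply bisectRight_unique _ _ _ hs (by simp)
  · intro j hj hj0; omega
  · intro j hj _
    cases j with
    | zero => simpa using h
    | succ j' =>
      have hj' : j' < es.length := by simpa using hj
      have hmem : es[j'] ∈ es := List.getElem_mem hj'
      have hle : e ≤ es[j'] := (List.pairwise_cons.mp hs).1 _ hmem
      simpa using lt_of_lt_of_le h hle

theorem bisectRight_cons_le (e : Int) (es : List Int) (x : Int)
    (hs : List.Pairwise (fun a b => a ≤ b) (e :: es)) (h : e ≤ x) :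
    PySem.List.bisectRight (e :: es) x = PySem.List.bisectRight es x + 1 := by
  have hs' : List.Pairwise (fun a b => a ≤ b) es := (List.pairwise_cons.mp hs).2
  obtain ⟨hi1, hi2, hi3⟩ := PySem.List.bisectRight_spec es x hs'
  apply bisectRight_unique _ _ _ hs (by simpa using hi1)
  · intro j hj hjk
    cases j with
    | zero => simpa using h
    | succ j' =>
      have hj' : j' < es.length := by simpa using hj
      have := hi2 j' hj' (by omega)
      simpa using this
  · intro j hj hjk
    cases j with
    | zero => omega
    | succ j' =>
      have hj' : j' < es.length := by simpa using hj
      have := hi3 j' hj' (by omega)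
      simpa using this

theorem lfiLoop_eq_bisect (ls : List (List Char)) (n index s : Int) :
    lfiLoop n index s ls =
      (let ends := cumEnds s ls
       let i := PySem.List.bisectRight ends index
       if i < ls.length then
         (String.ofList (PySem.List.slice (ls.getD i []) none (some (-1))),
           ends.getD i 0 - ((ls.getD i []).length : Int))
       else ("", n)) := by
  induction ls generalizing s with
  | nil => simp [lfiLoop, cumEnds]
  | cons l rest ih =>
    simp only [lfiLoop, cumEnds]
    by_cases hgt : s + (l.length : Int) > index
    · have hb := bisectRight_cons_lt (s + l.length) (cumEnds (s + l.length) rest) index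
        (by simpa [cumEnds] using cumEnds_pairwise s (l :: rest)) (by omega)
      simp [hgt, hb, List.getD]
    · have hsorted : List.Pairwise (fun a b => a ≤ b)
          ((s + (l.length : Int)) :: cumEnds (s + l.length) rest) := by
        simpa [cumEnds] using cumEnds_pairwise s (l :: rest)
      have hb := bisectRight_cons_le (s + l.length) (cumEnds (s + l.length) rest) index
        hsorted (by omega)
      simp only [hgt, if_false]
      rw [ih (s + l.length)]
      simp only [hb, List.length_cons, List.getD]
      simp only [Nat.add_lt_add_iff_right, List.getElem?_cons_succ]

-- ===== VERDICT (by name: the statement is the Claim_ definition above) =====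
theorem line_from_index_spec : Claim_equal_line_from_index := by
  intro text index _
  unfold Spec_line_from_index line_from_index line_from_index_alt
  exact lfiLoop_eq_bisect (splitlinesKeep text.toList) _ index 0
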